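-- pv_equiv track=rewrite | github.com/sarasadatnasr/python-warmUp | QueraQuastion/peydayesh.py | find
-- ===== SOURCE A (Python) =====
-- def find(num1, num2, num3):
--     number = []
--     number.append(num1)
--     number.append(num2)
--     number.append(num3)
--     for i in range(1, 5):
--         if i not in number:
--             return i
-- ===== SOURCE B (Python) =====
-- # Branch to a precomputed answer: encode which of 1..4 are covered as a 4-bit
-- # mask, then read the smallest missing candidate from a 15-entry lookup table
-- # (mask 15 is unreachable: three inputs cannot cover four candidates).
-- _LOWEST_MISSING = (1, 2, 1, 3, 1, 2, 1, 4, 1, 2, 1, 3, 1, 2, 1)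
--
-- def find(num1, num2, num3):
--     mask = 0
--     for n in (num1, num2, num3):
--         if 1 <= n <= 4:
--             mask |= 1 << (n - 1)
--     return _LOWEST_MISSING[mask]
-- ===== Notes on version B (the rewrite author's own statement) =====
-- stated objective: alternative
-- what changed: Replaced the ordered scan over candidates 1..4 with list-membership tests by a 4-bit coverage bitmask built in one pass over the inputs and a precomputed 15-entry lookup table giving the smallest missing candidate per mask.
import Mathlib
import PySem

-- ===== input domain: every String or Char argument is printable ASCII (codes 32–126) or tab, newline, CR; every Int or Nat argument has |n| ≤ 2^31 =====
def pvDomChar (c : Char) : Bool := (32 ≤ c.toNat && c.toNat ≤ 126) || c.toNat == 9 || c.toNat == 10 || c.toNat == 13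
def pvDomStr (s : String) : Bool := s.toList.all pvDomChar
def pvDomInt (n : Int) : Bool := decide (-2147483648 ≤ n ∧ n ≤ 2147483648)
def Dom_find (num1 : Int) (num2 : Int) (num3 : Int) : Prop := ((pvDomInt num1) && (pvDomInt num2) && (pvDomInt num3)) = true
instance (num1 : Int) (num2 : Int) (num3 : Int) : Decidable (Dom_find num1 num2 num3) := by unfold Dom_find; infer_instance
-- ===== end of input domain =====

-- B replaces A's ordered scan over range(1,5) with membership tests by a bitmask of covered
-- candidates read against a precomputed lookup table (objective: alternative, branch-light).

-- ===== PORT A =====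
-- the for-loop over range(1,5): return the first i not in number
def findLoop (number : List Int) : List Int → Option Int
  | [] => none
  | i :: rest => if i ∈ number then findLoop number rest else some i

def find (num1 : Int) (num2 : Int) (num3 : Int) : Option Int :=
  let number : List Int := [num1, num2, num3]
  findLoop number (PySem.List.pyRange 1 5 1)

-- ===== PORT B =====
-- _LOWEST_MISSING: mask's bit k set means value k+1 is covered; entry = smallest missing value
def pvLowestMissing : List Int := [1, 2, 1, 3, 1, 2, 1, 4, 1, 2, 1, 3, 1, 2, 1]

-- the loop 'for n in (num1,num2,num3): if 1 <= n <= 4: mask |= 1 << (n-1)', then the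
-- tuple indexing _LOWEST_MISSING[mask] (mask ≥ 0, so pyGet? is exact Python indexing)
def find_alt (num1 : Int) (num2 : Int) (num3 : Int) : Option Int :=
  let mask : Int :=
    [num1, num2, num3].foldl
      (fun m n => if 1 ≤ n ∧ n ≤ 4 then Int.lor m ((1 : Int) <<< (n - 1)) else m) 0
  PySem.List.pyGet? pvLowestMissing mask

-- ===== PRECONDITION & SPEC =====
def Spec_find (num1 : Int) (num2 : Int) (num3 : Int) (out : Option Int) : Prop := out = find_alt num1 num2 num3
instance (num1 : Int) (num2 : Int) (num3 : Int) (out : Option Int) : Decidable (Spec_find num1 num2 num3 out) := by unfold Spec_find; infer_instance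

-- ===== CLAIM (what is proved, stated in full; the proofs are below) =====
def Claim_equal_find : Prop := ∀ (num1 : Int) (num2 : Int) (num3 : Int), Dom_find num1 num2 num3 → Spec_find num1 num2 num3 (find num1 num2 num3)

-- ===== LEMMAS AND PROOFS =====
-- normalization: values outside 1..4 behave exactly like 0 in both programs
def pvNorm (n : Int) : Int := if n = 1 ∨ n = 2 ∨ n = 3 ∨ n = 4 then n else 0

lemma pvNorm_mem (n : Int) :
    pvNorm n = 0 ∨ pvNorm n = 1 ∨ pvNorm n = 2 ∨ pvNorm n = 3 ∨ pvNorm n = 4 := by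
  unfold pvNorm; split_ifs <;> omega

lemma pvRange14 : PySem.List.pyRange 1 5 1 = [1, 2, 3, 4] := by decide

lemma pvEqNorm (i n : Int) (hi : i = 1 ∨ i = 2 ∨ i = 3 ∨ i = 4) : (i = pvNorm n) = (i = n) := by
  unfold pvNorm; split_ifs <;> (apply propext; omega)

lemma pvStepNorm (m n : Int) :
    (if 1 ≤ pvNorm n ∧ pvNorm n ≤ 4 then Int.lor m ((1 : Int) <<< (pvNorm n - 1)) else m)
      = (if 1 ≤ n ∧ n ≤ 4 then Int.lor m ((1 : Int) <<< (n - 1)) else m) := by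
  unfold pvNorm; split_ifs <;> first | rfl | (exfalso; omega)

lemma pvFindNorm (n1 n2 n3 : Int) : find (pvNorm n1) (pvNorm n2) (pvNorm n3) = find n1 n2 n3 := by
  unfold find
  rw [pvRange14]
  simp only [findLoop, List.mem_cons, List.not_mem_nil, or_false,
    pvEqNorm 1 _ (by omega), pvEqNorm 2 _ (by omega),
    pvEqNorm 3 _ (by omega), pvEqNorm 4 _ (by omega)]

lemma pvAltNorm (n1 n2 n3 : Int) :
    find_alt (pvNorm n1) (pvNorm n2) (pvNorm n3) = find_alt n1 n2 n3 := by
  unfold find_alt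
  simp only [List.foldl, pvStepNorm]

-- ===== VERDICT (by name: the statement is the Claim_ definition above) =====
set_option maxHeartbeats 2000000 in
theorem find_spec : Claim_equal_find := by
  intro n1 n2 n3 _
  unfold Spec_find
  rw [← pvFindNorm, ← pvAltNorm]
  rcases pvNorm_mem n1 with e1 | e1 | e1 | e1 | e1 <;>
  rcases pvNorm_mem n2 with e2 | e2 | e2 | e2 | e2 <;>
  rcases pvNorm_mem n3 with e3 | e3 | e3 | e3 | e3 <;>
  rw [e1, e2, e3] <;> decide
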